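-- pv_equiv track=rewrite | github.com/johncarlocos/AI.royaley | app/services/master_data/source_registry.py | extract_source_key
-- ===== SOURCE A (Python) =====
-- SOURCE_PREFIXES = [
--     "bdl_", "espn_", "sportsdb_", "pinnacle_", "nflfastr_", "cfbfastr_",
--     "baseballr_", "hockeyr_", "wehoop_", "hoopr_", "cfl_", "nhl_api_",
--     "sportsipy_", "bref_", "cfbd_", "matchstat_", "realgm_", "ngs_",
--     "kaggle_", "ta_",
-- ]
--
-- def extract_source_key(external_id: str) -> str:
--     """Extract source key from external_id prefix pattern."""
--     if not external_id:
--         return "unknown"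
--
--     eid_lower = external_id.lower()
--     for prefix in SOURCE_PREFIXES:
--         if eid_lower.startswith(prefix):
--             return prefix.rstrip("_")
--
--     # If numeric only, likely ESPN
--     if external_id.isdigit():
--         return "espn"
--
--     return "unknown"
-- ===== SOURCE B (Python) =====
-- # Dispatch table keyed by first character: (prefix, source_key) pairs, precomputed
-- # so no per-call rstrip and only the handful of prefixes sharing the first letter
-- # are ever tested.
-- _PREFIX_TABLE = {
--     "b": (("bdl_", "bdl"), ("baseballr_", "baseballr"), ("bref_", "bref")),
--     "e": (("espn_", "espn"),),
--     "s": (("sportsdb_", "sportsdb"), ("sportsipy_", "sportsipy")),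
--     "p": (("pinnacle_", "pinnacle"),),
--     "n": (("nflfastr_", "nflfastr"), ("nhl_api_", "nhl_api"), ("ngs_", "ngs")),
--     "c": (("cfbfastr_", "cfbfastr"), ("cfl_", "cfl"), ("cfbd_", "cfbd")),
--     "h": (("hockeyr_", "hockeyr"), ("hoopr_", "hoopr")),
--     "w": (("wehoop_", "wehoop"),),
--     "k": (("kaggle_", "kaggle"),),
--     "m": (("matchstat_", "matchstat"),),
--     "r": (("realgm_", "realgm"),),
--     "t": (("ta_", "ta"),),
-- }
--
--
-- def extract_source_key(external_id: str) -> str: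
--     """Extract source key from external_id prefix pattern."""
--     if not external_id:
--         return "unknown"
--     e = external_id.lower()
--     for prefix, key in _PREFIX_TABLE.get(e[0], ()):
--         if e.startswith(prefix):
--             return key
--     return "espn" if external_id.isdigit() else "unknown"
-- ===== Notes on version B (the rewrite author's own statement) =====
-- stated objective: alternative
-- what changed: Replaces the linear scan over all 20 prefixes (with a per-hit rstrip) by a precomputed dispatch dict keyed on the first character of the lowercased id, whose values are (prefix, key) pairs, so only the few prefixes sharing that first letter are tested and no rstrip runs at call time.
import Mathlib
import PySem

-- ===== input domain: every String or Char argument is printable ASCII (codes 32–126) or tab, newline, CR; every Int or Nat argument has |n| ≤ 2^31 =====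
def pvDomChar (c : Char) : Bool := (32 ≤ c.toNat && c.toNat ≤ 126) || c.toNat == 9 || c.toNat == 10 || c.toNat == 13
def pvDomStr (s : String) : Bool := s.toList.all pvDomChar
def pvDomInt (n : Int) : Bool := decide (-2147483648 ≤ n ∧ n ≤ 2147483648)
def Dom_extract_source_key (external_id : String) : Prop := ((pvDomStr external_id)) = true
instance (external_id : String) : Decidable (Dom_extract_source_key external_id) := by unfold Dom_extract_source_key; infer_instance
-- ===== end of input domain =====

-- B replaces A's scan of all 20 prefixes by a dispatch dict keyed on the first character
-- of the lowercased id, with precomputed (prefix, key) pairs (no per-call rstrip).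

-- ===== PORT A =====
def SOURCE_PREFIXES : List String :=
  ["bdl_", "espn_", "sportsdb_", "pinnacle_", "nflfastr_", "cfbfastr_",
   "baseballr_", "hockeyr_", "wehoop_", "hoopr_", "cfl_", "nhl_api_",
   "sportsipy_", "bref_", "cfbd_", "matchstat_", "realgm_", "ngs_",
   "kaggle_", "ta_"]

-- prefix.rstrip("_"): drop trailing '_' characters (hand port; exact for the single strip char '_')
def rstripUnderscores (s : String) : String :=
  String.ofList ((s.toList.reverse.dropWhile (fun c => c == '_')).reverse)

-- the for-loop with early return over SOURCE_PREFIXES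
def scanA (eid_lower : String) : List String → Option String
  | [] => none
  | p :: ps =>
    if PySem.Str.startswith eid_lower p then some (rstripUnderscores p)
    else scanA eid_lower ps

def extract_source_key (external_id : String) : String :=
  if external_id = "" then "unknown"
  else
    let eid_lower := PySem.Str.lower external_id
    match scanA eid_lower SOURCE_PREFIXES with
    | some k => k
    | none => if PySem.Str.strIsdigit external_id then "espn" else "unknown"

-- ===== PORT B =====
def PREFIX_TABLE : PySem.Dict Char (List (String × String)) := PySem.Dict.mk
  [('b', [("bdl_", "bdl"), ("baseballr_", "baseballr"), ("bref_", "bref")]),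
   ('e', [("espn_", "espn")]),
   ('s', [("sportsdb_", "sportsdb"), ("sportsipy_", "sportsipy")]),
   ('p', [("pinnacle_", "pinnacle")]),
   ('n', [("nflfastr_", "nflfastr"), ("nhl_api_", "nhl_api"), ("ngs_", "ngs")]),
   ('c', [("cfbfastr_", "cfbfastr"), ("cfl_", "cfl"), ("cfbd_", "cfbd")]),
   ('h', [("hockeyr_", "hockeyr"), ("hoopr_", "hoopr")]),
   ('w', [("wehoop_", "wehoop")]),
   ('k', [("kaggle_", "kaggle")]),
   ('m', [("matchstat_", "matchstat")]),
   ('r', [("realgm_", "realgm")]),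
   ('t', [("ta_", "ta")])]

-- the for-loop with early return over one bucket of (prefix, key) pairs
def scanB (e : String) : List (String × String) → Option String
  | [] => none
  | (p, key) :: rest =>
    if PySem.Str.startswith e p then some key else scanB e rest

def extract_source_key_alt (external_id : String) : String :=
  if external_id = "" then "unknown"
  else
    let e := PySem.Str.lower external_id
    -- e[0]: the empty-string guard makes e nonempty, so headD never takes its default
    match scanB e (PySem.Dict.getD PREFIX_TABLE (e.toList.headD ' ') []) with
    | some k => k
    | none => if PySem.Str.strIsdigit external_id then "espn" else "unknown"

-- ===== PRECONDITION & SPEC =====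
def Spec_extract_source_key (external_id : String) (out : String) : Prop := out = extract_source_key_alt external_id
instance (external_id : String) (out : String) : Decidable (Spec_extract_source_key external_id out) := by unfold Spec_extract_source_key; infer_instance

-- ===== CLAIM (what is proved, stated in full; the proofs are below) =====
def Claim_equal_extract_source_key : Prop := ∀ (external_id : String), Dom_extract_source_key external_id → Spec_extract_source_key external_id (extract_source_key external_id)

-- ===== LEMMAS AND PROOFS =====

-- rstrip of each prefix literal, precomputed
lemma rstrip_bdl : rstripUnderscores "bdl_" = "bdl" := by decide
lemma rstrip_baseballr : rstripUnderscores "baseballr_" = "baseballr" := by decide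
lemma rstrip_bref : rstripUnderscores "bref_" = "bref" := by decide
lemma rstrip_espn : rstripUnderscores "espn_" = "espn" := by decide
lemma rstrip_sportsdb : rstripUnderscores "sportsdb_" = "sportsdb" := by decide
lemma rstrip_sportsipy : rstripUnderscores "sportsipy_" = "sportsipy" := by decide
lemma rstrip_pinnacle : rstripUnderscores "pinnacle_" = "pinnacle" := by decide
lemma rstrip_nflfastr : rstripUnderscores "nflfastr_" = "nflfastr" := by decide
lemma rstrip_nhl_api : rstripUnderscores "nhl_api_" = "nhl_api" := by decide
lemma rstrip_ngs : rstripUnderscores "ngs_" = "ngs" := by decide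
lemma rstrip_cfbfastr : rstripUnderscores "cfbfastr_" = "cfbfastr" := by decide
lemma rstrip_cfl : rstripUnderscores "cfl_" = "cfl" := by decide
lemma rstrip_cfbd : rstripUnderscores "cfbd_" = "cfbd" := by decide
lemma rstrip_hockeyr : rstripUnderscores "hockeyr_" = "hockeyr" := by decide
lemma rstrip_hoopr : rstripUnderscores "hoopr_" = "hoopr" := by decide
lemma rstrip_wehoop : rstripUnderscores "wehoop_" = "wehoop" := by decide
lemma rstrip_kaggle : rstripUnderscores "kaggle_" = "kaggle" := by decide
lemma rstrip_matchstat : rstripUnderscores "matchstat_" = "matchstat" := by decide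
lemma rstrip_realgm : rstripUnderscores "realgm_" = "realgm" := by decide
lemma rstrip_ta : rstripUnderscores "ta_" = "ta" := by decide

-- the two scans agree on every string: only the bucket of the first character can match
set_option maxHeartbeats 1000000 in
lemma scan_eq (e : String) :
    scanA e SOURCE_PREFIXES
      = scanB e (PySem.Dict.getD PREFIX_TABLE (e.toList.headD ' ') []) := by
  cases h : e.toList with
  | nil => simp [scanA, scanB, SOURCE_PREFIXES, PREFIX_TABLE, PySem.Dict.getD, PySem.Dict.get?, PySem.Chars.startswith, h]
  | cons c t =>
    by_cases h0 : c = 'b'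
    · subst h0
      simp [scanA, scanB, SOURCE_PREFIXES, PREFIX_TABLE, PySem.Dict.getD, PySem.Dict.get?, PySem.Chars.startswith, rstrip_bdl, rstrip_baseballr, rstrip_bref, h]
    by_cases h1 : c = 'e'
    · subst h1
      simp [scanA, scanB, SOURCE_PREFIXES, PREFIX_TABLE, PySem.Dict.getD, PySem.Dict.get?, PySem.Chars.startswith, rstrip_espn, h]
    by_cases h2 : c = 's'
    · subst h2
      simp [scanA, scanB, SOURCE_PREFIXES, PREFIX_TABLE, PySem.Dict.getD, PySem.Dict.get?, PySem.Chars.startswith, rstrip_sportsdb, rstrip_sportsipy, h]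
    by_cases h3 : c = 'p'
    · subst h3
      simp [scanA, scanB, SOURCE_PREFIXES, PREFIX_TABLE, PySem.Dict.getD, PySem.Dict.get?, PySem.Chars.startswith, rstrip_pinnacle, h]
    by_cases h4 : c = 'n'
    · subst h4
      simp [scanA, scanB, SOURCE_PREFIXES, PREFIX_TABLE, PySem.Dict.getD, PySem.Dict.get?, PySem.Chars.startswith, rstrip_nflfastr, rstrip_nhl_api, rstrip_ngs, h]
    by_cases h5 : c = 'c'
    · subst h5
      simp [scanA, scanB, SOURCE_PREFIXES, PREFIX_TABLE, PySem.Dict.getD, PySem.Dict.get?, PySem.Chars.startswith, rstrip_cfbfastr, rstrip_cfl, rstrip_cfbd, h]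
    by_cases h6 : c = 'h'
    · subst h6
      simp [scanA, scanB, SOURCE_PREFIXES, PREFIX_TABLE, PySem.Dict.getD, PySem.Dict.get?, PySem.Chars.startswith, rstrip_hockeyr, rstrip_hoopr, h]
    by_cases h7 : c = 'w'
    · subst h7
      simp [scanA, scanB, SOURCE_PREFIXES, PREFIX_TABLE, PySem.Dict.getD, PySem.Dict.get?, PySem.Chars.startswith, rstrip_wehoop, h]
    by_cases h8 : c = 'k'
    · subst h8
      simp [scanA, scanB, SOURCE_PREFIXES, PREFIX_TABLE, PySem.Dict.getD, PySem.Dict.get?, PySem.Chars.startswith, rstrip_kaggle, h]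
    by_cases h9 : c = 'm'
    · subst h9
      simp [scanA, scanB, SOURCE_PREFIXES, PREFIX_TABLE, PySem.Dict.getD, PySem.Dict.get?, PySem.Chars.startswith, rstrip_matchstat, h]
    by_cases h10 : c = 'r'
    · subst h10
      simp [scanA, scanB, SOURCE_PREFIXES, PREFIX_TABLE, PySem.Dict.getD, PySem.Dict.get?, PySem.Chars.startswith, rstrip_realgm, h]
    by_cases h11 : c = 't'
    · subst h11
      simp [scanA, scanB, SOURCE_PREFIXES, PREFIX_TABLE, PySem.Dict.getD, PySem.Dict.get?, PySem.Chars.startswith, rstrip_ta, h]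
    simp [scanA, scanB, SOURCE_PREFIXES, PREFIX_TABLE, PySem.Dict.getD, PySem.Dict.get?, PySem.Chars.startswith, h, Ne.symm h0, Ne.symm h1, Ne.symm h2, Ne.symm h3, Ne.symm h4, Ne.symm h5, Ne.symm h6, Ne.symm h7, Ne.symm h8, Ne.symm h9, Ne.symm h10, Ne.symm h11]

-- ===== VERDICT (by name: the statement is the Claim_ definition above) =====
theorem extract_source_key_spec : Claim_equal_extract_source_key := by
  intro external_id _
  unfold Spec_extract_source_key extract_source_key extract_source_key_alt
  by_cases hs : external_id = ""
  · simp [hs]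
  · simp only [if_neg hs]
    rw [scan_eq]
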